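-- pv_equiv track=rewrite | github.com/SpacemanSpiff7/ESKeDiT | eskedit/ktools.py | count_strong_start_codons
-- ===== SOURCE A (Python) =====
-- def _kozak_strength(sequence: str) -> int:
--     # 3: Strong = (A/G)NNAUGG
--     # 2: Moderate = (A/G)NNAUGN or NNNAUGG
--     # 1: Weak = NNNAUGN
--     # 0: Nothing = NNNNNNN
--     if len(sequence) != 7:
--         return 0
--     else:
--         score = 0
--         putative_start_codon = sequence[3:6]
--         if putative_start_codon == 'ATG':
--             score += 1
--         else:
--             return 0
--         if sequence[0] == 'A' or sequence[0] == 'G':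
--             score += 1
--         if sequence[6] == 'G':
--             score += 1
--         return score
--
-- def count_strong_start_codons(sequence: str, kmer_length: int) -> int:
--     # start_codon = re.compile(r'ATG')
--     count = 0
--     kozak_str = _kozak_strength
--
--     for cdn_start in range(len(sequence)):
--         next_codon = sequence[cdn_start:cdn_start + 3]
--         if next_codon == 'ATG':
--             if cdn_start - 3 < 0 or cdn_start + 4 > len(sequence) - 1:
--                 continue
--             else:
--                 context = sequence[cdn_start - 3:cdn_start + 4]
--                 if kozak_str(context) == 3:
--                     count += 1
--     return count
-- ===== SOURCE B (Python) =====
-- def count_strong_start_codons(sequence: str, kmer_length: int) -> int: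
--     # Streaming automaton: fold over the characters once, keeping only the
--     # last 6 characters in a bounded buffer; count when the current char is 'G'
--     # and the buffer shows [AG]..ATG just before it.  No indexing or slicing.
--     count = 0
--     hist = []
--     for ch in sequence:
--         if ch == 'G' and len(hist) == 6 and (hist[0] == 'A' or hist[0] == 'G') \
--                 and hist[3:6] == ['A', 'T', 'G']:
--             count += 1
--         hist.append(ch)
--         if len(hist) > 6:
--             hist.pop(0)
--     return count
-- ===== Notes on version B (the rewrite author's own statement) =====
-- stated objective: alternative
-- what changed: Replaces A's index loop with slicing and a separate 7-mer Kozak scoring helper by a single streaming automaton: one fold over the characters keeping only a bounded 6-character history buffer, counting when the incoming char is 'G' and the buffer ends in [AG]..ATG.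
-- intended difference: On sequences whose last 7 characters form a strong Kozak context [AG]..ATGG, A's off-by-one boundary guard (cdn_start + 4 > len - 1 instead of > len) skips that final context and returns one less than the true count, while B counts it; B's value is the intended count of strong start codons. — e.g. on count_strong_start_codons("AXXATGG", 0): A returns 0, B returns 1
import Mathlib
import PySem

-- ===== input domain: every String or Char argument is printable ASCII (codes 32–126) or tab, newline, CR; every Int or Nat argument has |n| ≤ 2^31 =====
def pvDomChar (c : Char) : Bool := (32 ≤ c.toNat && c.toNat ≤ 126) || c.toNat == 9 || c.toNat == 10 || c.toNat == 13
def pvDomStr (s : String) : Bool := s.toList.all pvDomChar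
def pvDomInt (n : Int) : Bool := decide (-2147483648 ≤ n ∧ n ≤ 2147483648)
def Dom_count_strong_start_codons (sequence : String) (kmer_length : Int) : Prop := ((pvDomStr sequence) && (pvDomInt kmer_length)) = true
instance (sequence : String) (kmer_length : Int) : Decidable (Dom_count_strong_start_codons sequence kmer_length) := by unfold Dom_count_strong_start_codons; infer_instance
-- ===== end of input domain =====

-- B replaces A's index loop + slicing + separate 7-mer Kozak scorer by a one-pass streaming
-- automaton over the characters with a bounded 6-char history buffer (alternative structure);
-- B also counts a strong context ending at the very last character, which A's off-by-one
-- boundary guard skips (see D_ below).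

-- ===== PORT A =====
def pv_kozak_strength (s : String) : Int :=
  if PySem.Str.len s ≠ 7 then 0
  else
    let score : Int := 0
    let putative_start_codon := PySem.Str.slice s (some 3) (some 6)
    if putative_start_codon = "ATG" then
      let score := score + 1
      let score := if PySem.Str.pyGet? s 0 = some 'A' ∨ PySem.Str.pyGet? s 0 = some 'G' then score + 1 else score
      if PySem.Str.pyGet? s 6 = some 'G' then score + 1 else score
    else 0

def count_strong_start_codons (sequence : String) (kmer_length : Int) : Int :=
  (PySem.List.pyRange 0 (PySem.Str.len sequence)).foldl
    (fun count cdn_start =>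
      let next_codon := PySem.Str.slice sequence (some cdn_start) (some (cdn_start + 3))
      if next_codon = "ATG" then
        if cdn_start - 3 < 0 ∨ cdn_start + 4 > PySem.Str.len sequence - 1 then count
        else
          let context := PySem.Str.slice sequence (some (cdn_start - 3)) (some (cdn_start + 4))
          if pv_kozak_strength context = 3 then count + 1 else count
      else count) 0

-- ===== PORT B =====
-- the loop body of Source B: check the incoming char against the history buffer, then push it
-- into the buffer and trim the buffer to the last 6 chars
def pvStep (st : Int × List Char) (ch : Char) : Int × List Char :=
  let count := st.1
  let hist := st.2
  let count :=
    if ch = 'G' ∧ hist.length = 6 ∧ (hist[0]? = some 'A' ∨ hist[0]? = some 'G')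
        ∧ (hist.drop 3).take 3 = ['A', 'T', 'G']
    then count + 1 else count
  let hist := hist ++ [ch]
  let hist := if hist.length > 6 then hist.drop 1 else hist
  (count, hist)

def count_strong_start_codons_alt (sequence : String) (kmer_length : Int) : Int :=
  (sequence.toList.foldl pvStep (0, [])).1

-- ===== PRECONDITION & SPEC =====
-- On sequences whose last 7 characters form a strong Kozak context [AG]..ATGG, A's off-by-one
-- boundary guard (cdn_start + 4 > len - 1 instead of > len) skips that final context and returns
-- one less than the true count; B counts it, which is the intended count of strong start codons.
def D_count_strong_start_codons (sequence : String) (kmer_length : Int) : Prop :=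
  (['A', 'T', 'G', 'G'] <:+ sequence.toList) ∧
  ((sequence.toList.rdrop 6).getLast? = some 'A' ∨ (sequence.toList.rdrop 6).getLast? = some 'G')
instance (sequence : String) (kmer_length : Int) : Decidable (D_count_strong_start_codons sequence kmer_length) := by
  unfold D_count_strong_start_codons; infer_instance

def Spec_count_strong_start_codons (sequence : String) (kmer_length : Int) (out : Int) : Prop :=
  ¬ D_count_strong_start_codons sequence kmer_length → out = count_strong_start_codons_alt sequence kmer_length
instance (sequence : String) (kmer_length : Int) (out : Int) : Decidable (Spec_count_strong_start_codons sequence kmer_length out) := by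
  unfold Spec_count_strong_start_codons; infer_instance

def pvDiffWitness_count_strong_start_codons : String × Int := ("AXXATGG", 0)
def pvDiffWitnessOut_count_strong_start_codons : Int × Int := (0, 1)

-- ===== CLAIM (what is proved, stated in full; the proofs are below) =====
def Claim_unchanged_count_strong_start_codons : Prop := ∀ (sequence : String) (kmer_length : Int), Dom_count_strong_start_codons sequence kmer_length → Spec_count_strong_start_codons sequence kmer_length (count_strong_start_codons sequence kmer_length)
def Claim_changed_count_strong_start_codons : Prop := Dom_count_strong_start_codons (pvDiffWitness_count_strong_start_codons.1) (pvDiffWitness_count_strong_start_codons.2) ∧ D_count_strong_start_codons (pvDiffWitness_count_strong_start_codons.1) (pvDiffWitness_count_strong_start_codons.2) ∧ count_strong_start_codons (pvDiffWitness_count_strong_start_codons.1) (pvDiffWitness_count_strong_start_codons.2) = pvDiffWitnessOut_count_strong_start_codons.1 ∧ count_strong_start_codons_alt (pvDiffWitness_count_strong_start_codons.1) (pvDiffWitness_count_strong_start_codons.2) = pvDiffWitnessOut_count_strong_start_codons.2 ∧ pvDiffWitnessOut_count_strong_start_codons.1 ≠ pvDiffWitnessOut_count_strong_start_codons.2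
def Claim_exact_count_strong_start_codons : Prop := ∀ (sequence : String) (kmer_length : Int), Dom_count_strong_start_codons sequence kmer_length → D_count_strong_start_codons sequence kmer_length → count_strong_start_codons sequence kmer_length ≠ count_strong_start_codons_alt sequence kmer_length

-- ===== LEMMAS AND PROOFS =====

-- the strong-Kozak-window test at window start w, on the character list:
-- w-th char in {A,G}, chars w+3..w+5 = ATG, char w+6 = G
def pvQ (l : List Char) (j : Nat) : Bool :=
  (l[j]? == some 'A' || l[j]? == some 'G') && (l[j+3]? == some 'A') &&
  (l[j+4]? == some 'T') && (l[j+5]? == some 'G') && (l[j+6]? == some 'G')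

lemma pvQ_iff (l : List Char) (w : Nat) : pvQ l w = true ↔
    ((l[w]? = some 'A' ∨ l[w]? = some 'G') ∧ l[w+3]? = some 'A' ∧
     l[w+4]? = some 'T' ∧ l[w+5]? = some 'G' ∧ l[w+6]? = some 'G') := by
  simp only [pvQ, Bool.and_eq_true, Bool.or_eq_true, beq_iff_eq]
  tauto

lemma pv_take3 (l : List Char) (m : Nat) (x y z : Char) :
    ((l.drop m).take 3 = [x, y, z]) ↔
      (l[m]? = some x ∧ l[m+1]? = some y ∧ l[m+2]? = some z) := by
  have h : ∀ d : List Char, (d.take 3 = [x, y, z]) ↔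
      (d[0]? = some x ∧ d[1]? = some y ∧ d[2]? = some z) := by
    intro d
    match d with
    | [] => simp
    | [a] => simp
    | [a, b] => simp
    | a :: b :: c :: rest => simp [List.take]
  rw [show l[m]? = (l.drop m)[0]? by simp [List.getElem?_drop],
      show l[m+1]? = (l.drop m)[1]? by simp [List.getElem?_drop],
      show l[m+2]? = (l.drop m)[2]? by simp [List.getElem?_drop]]
  exact h _

lemma pv_str_eq_ATG (s : String) : (s = "ATG") ↔ s.toList = ['A', 'T', 'G'] := by
  constructor
  · rintro rfl; rfl
  · intro h
    have h2 : String.ofList s.toList = String.ofList ['A','T','G'] := by rw [h]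
    simpa using h2

lemma pv_slice3_iff (s : String) (a : Nat) :
    (PySem.Str.slice s (some ((a : Nat) : Int)) (some (((a + 3 : Nat)) : Int)) = "ATG") ↔
      (s.toList[a]? = some 'A' ∧ s.toList[a+1]? = some 'T' ∧ s.toList[a+2]? = some 'G') := by
  rw [pv_str_eq_ATG, PySem.Str.toList_slice, PySem.Chars.slice_eq_listSlice,
      PySem.List.slice_natCast, show (a + 3 - a = 3) from by omega]
  exact pv_take3 _ _ _ _ _

lemma pv_kozak_three (c : String) :
    (pv_kozak_strength c = 3) ↔
      (c.toList.length = 7 ∧ (c.toList[0]? = some 'A' ∨ c.toList[0]? = some 'G') ∧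
       c.toList[3]? = some 'A' ∧ c.toList[4]? = some 'T' ∧ c.toList[5]? = some 'G' ∧
       c.toList[6]? = some 'G') := by
  have hsl : (PySem.Str.slice c (some 3) (some 6) = "ATG") ↔
      (c.toList[3]? = some 'A' ∧ c.toList[4]? = some 'T' ∧ c.toList[5]? = some 'G') := by
    rw [pv_str_eq_ATG, PySem.Str.toList_slice, PySem.Chars.slice_eq_listSlice,
        show ((3:Int) = ((3:Nat):Int)) from rfl, show ((6:Int) = ((6:Nat):Int)) from rfl,
        PySem.List.slice_natCast, show ((6:Nat) - 3 = 3) from rfl]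
    exact pv_take3 _ _ _ _ _
  have hg0 : PySem.Str.pyGet? c 0 = c.toList[0]? := PySem.Str.pyGet?_natCast c 0
  have hg6 : PySem.Str.pyGet? c 6 = c.toList[6]? := PySem.Str.pyGet?_natCast c 6
  simp only [pv_kozak_strength, PySem.Str.len_eq, hg0, hg6]
  split_ifs with h1 h2 h3 h4 h5
  · constructor
    · intro h; omega
    · rintro ⟨hl, -⟩; exfalso; apply h1; exact_mod_cast hl
  · constructor
    · intro _
      exact ⟨by omega, h4, (hsl.mp h2).1, (hsl.mp h2).2.1, (hsl.mp h2).2.2, h3⟩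
    · intro _; norm_num
  · constructor
    · intro h; omega
    · rintro ⟨-, h0, -⟩; exact absurd h0 h4
  · constructor
    · intro h; omega
    · rintro ⟨-, -, -, -, -, h6⟩; exact absurd h6 h3
  · constructor
    · intro h; omega
    · rintro ⟨-, -, -, -, -, h6⟩; exact absurd h6 h3
  · constructor
    · intro h; omega
    · rintro ⟨-, -, h3', h4', h5', -⟩; exact absurd (hsl.mpr ⟨h3', h4', h5'⟩) h2

-- invariant of B's streaming fold: after n characters the state is
-- (number of strong windows fully inside the first n chars, last min(n,6) chars)
lemma pv_fold_inv (l : List Char) (n : Nat) (hn : n ≤ l.length) :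
    (l.take n).foldl pvStep (0, []) =
      (((List.range (n - 6)).countP (pvQ l) : Int), (l.take n).drop (n - 6)) := by
  induction n with
  | zero => simp
  | succ m ih =>
    have hm : m ≤ l.length := by omega
    have hmlt : m < l.length := by omega
    have hgetm : l[m]? = some l[m] := List.getElem?_eq_getElem hmlt
    have htake : l.take (m + 1) = l.take m ++ [l[m]] := by
      rw [List.take_add_one, hgetm]; rfl
    have htklen : (l.take m).length = m := List.length_take_of_le hm
    rw [htake, List.foldl_append, ih hm, List.foldl_cons, List.foldl_nil]
    by_cases h6 : 6 ≤ m
    · -- full buffer: the step condition is exactly pvQ l (m-6)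
      have hL : ((l.take m).drop (m - 6)).length = 6 := by
        rw [List.length_drop, htklen]; omega
      have hidx : ∀ i : Nat, i < 6 → ((l.take m).drop (m - 6))[i]? = l[m - 6 + i]? := by
        intro i hi
        rw [List.getElem?_drop, List.getElem?_take_of_lt (by omega)]
      have hcond : (l[m] = 'G' ∧ ((l.take m).drop (m - 6)).length = 6 ∧
          (((l.take m).drop (m - 6))[0]? = some 'A' ∨ ((l.take m).drop (m - 6))[0]? = some 'G') ∧
          (((l.take m).drop (m - 6)).drop 3).take 3 = ['A', 'T', 'G'])
          ↔ pvQ l (m - 6) = true := by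
        rw [pvQ_iff, pv_take3, hidx 0 (by omega), hidx 3 (by omega), hidx 4 (by omega),
            hidx 5 (by omega)]
        have hg : l[m - 6 + 6]? = some 'G' ↔ l[m] = 'G' := by
          rw [show m - 6 + 6 = m from by omega, hgetm]
          simp
        rw [show m - 6 + 3 + 1 = m - 6 + 4 from by omega,
            show m - 6 + 3 + 2 = m - 6 + 5 from by omega, show m - 6 + 0 = m - 6 from rfl]
        constructor
        · rintro ⟨hG, -, h0, h3, h4, h5⟩; exact ⟨h0, h3, h4, h5, hg.mpr hG⟩
        · rintro ⟨h0, h3, h4, h5, hG⟩; exact ⟨hg.mp hG, hL, h0, h3, h4, h5⟩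
      have hcount : ((List.range (m + 1 - 6)).countP (pvQ l) : Int) =
          if pvQ l (m - 6) = true then ((List.range (m - 6)).countP (pvQ l) : Int) + 1
          else ((List.range (m - 6)).countP (pvQ l) : Int) := by
        rw [show m + 1 - 6 = (m - 6) + 1 from by omega, List.range_succ, List.countP_append]
        simp [List.countP_cons]
        split_ifs <;> push_cast <;> omega
      have hgt : ((l.take m).drop (m - 6) ++ [l[m]]).length > 6 := by
        rw [List.length_append, hL]; norm_num
      have hhist : ((l.take m).drop (m - 6) ++ [l[m]]).drop 1 =
          (l.take m ++ [l[m]]).drop (m + 1 - 6) := by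
        rw [List.drop_append_of_le_length (by rw [hL]; norm_num),
            List.drop_append_of_le_length (by rw [htklen]; omega),
            List.drop_drop, show m - 6 + 1 = m + 1 - 6 from by omega]
      simp only [pvStep]
      rw [if_pos hgt, hhist, hcount]
      refine Prod.ext ?_ rfl
      simp only
      split_ifs with ha hb hc
      · rfl
      · exact absurd (hcond.mp ha) hb
      · exact absurd (hcond.mpr hc) ha
      · rfl
    · -- short buffer: no count possible, the buffer just grows
      have hz : m - 6 = 0 := by omega
      have hz1 : m + 1 - 6 = 0 := by omega
      have hno : ¬ (l[m] = 'G' ∧ (l.take m).length = 6 ∧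
          ((l.take m)[0]? = some 'A' ∨ (l.take m)[0]? = some 'G') ∧
          ((l.take m).drop 3).take 3 = ['A', 'T', 'G']) := by
        rintro ⟨-, hl6, -⟩
        rw [htklen] at hl6
        omega
      have hle : ¬ ((l.take m ++ [l[m]]).length > 6) := by
        rw [List.length_append, htklen]
        simp
        omega
      simp only [pvStep, hz, hz1, List.drop_zero]
      rw [if_neg hno, if_neg hle]

lemma pv_B_count (s : String) (k : Int) :
    count_strong_start_codons_alt s k =
      ((List.range (s.toList.length - 6)).countP (pvQ s.toList) : Int) := by
  have h := pv_fold_inv s.toList s.toList.length le_rfl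
  rw [List.take_length] at h
  unfold count_strong_start_codons_alt
  rw [h]

-- A's per-position test: position j holds a counted codon start
def pvPA (l : List Char) (j : Nat) : Bool :=
  decide (3 ≤ j ∧ j + 5 ≤ l.length) && pvQ l (j - 3)

lemma pv_kozak_window (s : String) (j : Nat) (h3 : 3 ≤ j) (h5 : j + 5 ≤ s.toList.length) :
    (pv_kozak_strength (PySem.Str.slice s (some ((j : Int) - 3)) (some ((j : Int) + 4))) = 3)
      ↔ (pvQ s.toList (j - 3) = true) := by
  have cm3 : ((j : Int) - 3) = (((j - 3 : Nat)) : Int) := by omega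
  have c4 : ((j : Int) + 4) = (((j - 3 + 7 : Nat)) : Int) := by omega
  rw [pv_kozak_three, PySem.Str.toList_slice, PySem.Chars.slice_eq_listSlice, cm3, c4,
      PySem.List.slice_natCast, show j - 3 + 7 - (j - 3) = 7 from by omega]
  have pv_window_get : ∀ i : Nat, i < 7 →
      ((s.toList.drop (j - 3)).take 7)[i]? = s.toList[j - 3 + i]? := by
    intro i hi
    simp [List.getElem?_drop, hi]
  rw [pv_window_get 0 (by norm_num), pv_window_get 3 (by norm_num),
      pv_window_get 4 (by norm_num), pv_window_get 5 (by norm_num),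
      pv_window_get 6 (by norm_num)]
  have hlen : ((s.toList.drop (j - 3)).take 7).length = 7 := by
    rw [List.length_take, List.length_drop]; omega
  simp only [hlen, pvQ, show j - 3 + 0 = j - 3 from by omega, true_and]
  simp only [Bool.and_eq_true, Bool.or_eq_true, beq_iff_eq]
  tauto

set_option maxHeartbeats 1000000 in
lemma pv_A_count (s : String) (k : Int) :
    count_strong_start_codons s k =
      ((List.range s.toList.length).countP (pvPA s.toList) : Int) := by
  simp only [count_strong_start_codons, PySem.Str.len_eq, PySem.List.pyRange_one,
    List.foldl_map]
  rw [show ((↑s.toList.length - 0 : Int)).toNat = s.toList.length from by omega]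
  have hfun : ∀ (c : Int) (j : Nat),
      (fun (count : Int) (cdn_start : Int) =>
        if PySem.Str.slice s (some cdn_start) (some (cdn_start + 3)) = "ATG" then
          if cdn_start - 3 < 0 ∨ cdn_start + 4 > ↑s.toList.length - 1 then count
          else
            if pv_kozak_strength (PySem.Str.slice s (some (cdn_start - 3)) (some (cdn_start + 4))) = 3
            then count + 1 else count
        else count) c ((0 : Int) + ↑j)
      = if pvPA s.toList j = true then c + 1 else c := by
    intro c j
    simp only [zero_add]
    by_cases hb : 3 ≤ j ∧ j + 5 ≤ s.toList.length
    · have hguard : ¬((j : Int) - 3 < 0 ∨ (j : Int) + 4 > ↑s.toList.length - 1) := by omega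
      have c3 : ((j : Int) + 3) = (((j + 3 : Nat)) : Int) := by omega
      have houter := pv_slice3_iff s j
      rw [← c3] at houter
      have hkoz := pv_kozak_window s j hb.1 hb.2
      simp only [houter, hkoz, if_neg hguard]
      by_cases hq : pvQ s.toList (j - 3) = true
      · obtain ⟨h0, h3, h4, h5, h6⟩ := (pvQ_iff _ _).mp hq
        have hE : s.toList[j]? = some 'A' ∧ s.toList[j+1]? = some 'T' ∧
            s.toList[j+2]? = some 'G' :=
          ⟨by rwa [show j - 3 + 3 = j from by omega] at h3,
           by rwa [show j - 3 + 4 = j + 1 from by omega] at h4,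
           by rwa [show j - 3 + 5 = j + 2 from by omega] at h5⟩
        have hpa : pvPA s.toList j = true := by
          simp only [pvPA, hq, Bool.and_true, decide_eq_true_eq]
          exact hb
        rw [if_pos hE, if_pos hq, hpa, if_pos rfl]
      · have hpa : pvPA s.toList j = false := by
          simp [pvPA, hq]
        rw [if_neg hq, hpa]
        simp only [Bool.false_eq_true, if_false, ite_self]
    · have hguard : ((j : Int) - 3 < 0 ∨ (j : Int) + 4 > ↑s.toList.length - 1) := by omega
      have hpa : pvPA s.toList j = false := by
        simp only [pvPA, Bool.and_eq_false_iff, decide_eq_false_iff_not]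
        left; exact hb
      rw [hpa]
      simp only [Bool.false_eq_true, if_false, if_pos hguard]
      split_ifs <;> rfl
  calc (List.range s.toList.length).foldl _ 0
      = (List.range s.toList.length).foldl
          (fun (c : Int) (j : Nat) => if pvPA s.toList j = true then c + 1 else c) 0 := by
        congr 1
        funext c j
        exact hfun c j
    _ = 0 + ((List.range s.toList.length).countP (pvPA s.toList) : Int) :=
        PySem.List.foldl_count_if _ _ _
    _ = _ := by rw [zero_add]

lemma pv_shift (l : List Char) :
    (List.range l.length).countP (pvPA l) = (List.range (l.length - 7)).countP (pvQ l) := by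
  by_cases h8 : 8 ≤ l.length
  · rw [show List.range l.length
          = List.range 3 ++ List.map (fun x => 3 + x) (List.range (l.length - 3)) from by
        rw [← List.range_add]; congr 1; omega]
    rw [List.countP_append, List.countP_map]
    rw [show List.range (l.length - 3)
          = List.range (l.length - 7) ++ List.map (fun x => (l.length - 7) + x) (List.range 4) from by
        rw [← List.range_add]; congr 1; omega]
    rw [List.countP_append, List.countP_map]
    have hz1 : (List.range 3).countP (pvPA l) = 0 := by
      rw [List.countP_eq_zero]
      intro j hj
      rw [List.mem_range] at hj
      simp only [pvPA, Bool.and_eq_true, decide_eq_true_eq]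
      rintro ⟨⟨h1, -⟩, -⟩; omega
    have hz2 : (List.range 4).countP ((pvPA l ∘ fun x => 3 + x) ∘ fun x => l.length - 7 + x) = 0 := by
      rw [List.countP_eq_zero]
      intro j hj
      rw [List.mem_range] at hj
      simp only [Function.comp_apply, pvPA, Bool.and_eq_true, decide_eq_true_eq]
      rintro ⟨⟨-, h2⟩, -⟩; omega
    rw [hz1, hz2]
    have hmain : (List.range (l.length - 7)).countP (pvPA l ∘ fun x => 3 + x)
        = (List.range (l.length - 7)).countP (pvQ l) := by
      apply List.countP_congr
      intro j hj
      rw [List.mem_range] at hj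
      simp only [Function.comp_apply, pvPA, show 3 + j - 3 = j from by omega]
      have : decide (3 ≤ 3 + j ∧ 3 + j + 5 ≤ l.length) = true := by
        rw [decide_eq_true_eq]; omega
      rw [this, Bool.true_and]
    rw [hmain]
    omega
  · have hz : (List.range l.length).countP (pvPA l) = 0 := by
      rw [List.countP_eq_zero]
      intro j hj
      simp only [pvPA, Bool.and_eq_true, decide_eq_true_eq]
      rintro ⟨⟨h1, h2⟩, -⟩; omega
    rw [hz, show l.length - 7 = 0 from by omega]
    rfl

lemma pv_take4 (d : List Char) (w x y z : Char) :
    (d.take 4 = [w, x, y, z]) ↔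
      (d[0]? = some w ∧ d[1]? = some x ∧ d[2]? = some y ∧ d[3]? = some z) := by
  match d with
  | [] => simp
  | [a] => simp
  | [a, b] => simp
  | [a, b, c] => simp
  | a :: b :: c :: e :: rest => simp [List.take]

lemma pv_D_iff (s : String) (k : Int) :
    D_count_strong_start_codons s k ↔
      (7 ≤ s.toList.length ∧ pvQ s.toList (s.toList.length - 7) = true) := by
  unfold D_count_strong_start_codons
  have h1 : (['A', 'T', 'G', 'G'] <:+ s.toList) ↔
      s.toList.reverse.take 4 = ['G', 'G', 'T', 'A'] := by
    rw [← List.reverse_prefix, show (['A','T','G','G'] : List Char).reverse = ['G','G','T','A'] from rfl,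
        List.prefix_iff_eq_take, show (['G','G','T','A'] : List Char).length = 4 from rfl, eq_comm]
  have h2 : (s.toList.rdrop 6).getLast? = s.toList.reverse[6]? := by
    have hlen : (s.toList.rdrop 6).length = s.toList.length - 6 := by
      simp [List.rdrop]
    rw [List.getLast?_eq_getElem?]
    by_cases h7 : 7 ≤ s.toList.length
    · rw [hlen, show s.toList.rdrop 6 = s.toList.take (s.toList.length - 6) from rfl,
          List.getElem?_take_of_lt (by omega), List.getElem?_reverse (by omega),
          show s.toList.length - 6 - 1 = s.toList.length - 1 - 6 from by omega]
    · rw [List.getElem?_eq_none (by omega), List.getElem?_eq_none (by rw [List.length_reverse]; omega)]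
  rw [h1, h2, pv_take4]
  constructor
  · rintro ⟨⟨h0, h1, h2, h3⟩, h6⟩
    have h7 : 7 ≤ s.toList.length := by
      have hlt : (6 : Nat) < s.toList.reverse.length := by
        rcases h6 with h | h <;> exact (List.getElem?_eq_some_iff.mp h).1
      rw [List.length_reverse] at hlt
      omega
    have hrev : ∀ i : Nat, i < 7 → s.toList.reverse[i]? = s.toList[s.toList.length - 1 - i]? :=
      fun i hi => List.getElem?_reverse (by omega)
    rw [hrev 0 (by omega)] at h0
    rw [hrev 1 (by omega)] at h1
    rw [hrev 2 (by omega)] at h2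
    rw [hrev 3 (by omega)] at h3
    rw [hrev 6 (by omega)] at h6
    refine ⟨h7, (pvQ_iff _ _).mpr ?_⟩
    rw [show s.toList.length - 7 + 3 = s.toList.length - 1 - 3 from by omega,
        show s.toList.length - 7 + 4 = s.toList.length - 1 - 2 from by omega,
        show s.toList.length - 7 + 5 = s.toList.length - 1 - 1 from by omega,
        show s.toList.length - 7 + 6 = s.toList.length - 1 - 0 from by omega,
        show s.toList.length - 7 = s.toList.length - 1 - 6 from by omega]
    exact ⟨h6, h3, h2, h1, h0⟩
  · rintro ⟨h7, hq⟩
    obtain ⟨hf, h3, h4, h5, h6⟩ := (pvQ_iff _ _).mp hq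
    have hrev : ∀ i : Nat, i < 7 → s.toList.reverse[i]? = s.toList[s.toList.length - 1 - i]? :=
      fun i hi => List.getElem?_reverse (by omega)
    refine ⟨⟨?_, ?_, ?_, ?_⟩, ?_⟩
    · rw [hrev 0 (by omega), show s.toList.length - 1 - 0 = s.toList.length - 7 + 6 from by omega]
      exact h6
    · rw [hrev 1 (by omega), show s.toList.length - 1 - 1 = s.toList.length - 7 + 5 from by omega]
      exact h5
    · rw [hrev 2 (by omega), show s.toList.length - 1 - 2 = s.toList.length - 7 + 4 from by omega]
      exact h4
    · rw [hrev 3 (by omega), show s.toList.length - 1 - 3 = s.toList.length - 7 + 3 from by omega]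
      exact h3
    · rw [hrev 6 (by omega), show s.toList.length - 1 - 6 = s.toList.length - 7 from by omega]
      exact hf

lemma pv_B_split (s : String) (k : Int) :
    count_strong_start_codons_alt s k =
      ((List.range (s.toList.length - 7)).countP (pvQ s.toList) : Int) +
      (if 7 ≤ s.toList.length ∧ pvQ s.toList (s.toList.length - 7) = true then 1 else 0) := by
  rw [pv_B_count s k]
  by_cases h7 : 7 ≤ s.toList.length
  · rw [show s.toList.length - 6 = (s.toList.length - 7) + 1 from by omega, List.range_succ,
        List.countP_append]
    have hone : List.countP (pvQ s.toList) [s.toList.length - 7]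
        = if pvQ s.toList (s.toList.length - 7) = true then 1 else 0 := by
      simp [List.countP_cons]
    rw [hone]
    split_ifs with ha hb hc
    · push_cast; ring
    · exact absurd ⟨h7, ha⟩ hb
    · exact absurd hc.2 ha
    · push_cast; ring
  · rw [show s.toList.length - 6 = s.toList.length - 7 from by omega,
        if_neg (by intro h; exact h7 h.1), add_zero]

-- ===== VERDICT (by name: the statement is the Claim_ definition above) =====
theorem count_strong_start_codons_spec : Claim_unchanged_count_strong_start_codons := by
  intro s k _ hnd
  rw [pv_A_count s k, pv_shift s.toList, pv_B_split s k,
      if_neg (fun h => hnd ((pv_D_iff s k).mpr h)), add_zero]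

theorem count_strong_start_codons_changed : Claim_changed_count_strong_start_codons := by
  unfold Claim_changed_count_strong_start_codons; decide

theorem count_strong_start_codons_tight : Claim_exact_count_strong_start_codons := by
  intro s k _ hd
  rw [pv_A_count s k, pv_shift s.toList, pv_B_split s k,
      if_pos ((pv_D_iff s k).mp hd)]
  omega
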